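-- pv_equiv track=rewrite | github.com/satyanarayan-rao/protein_binding_at_enhancers | scripts/get_length_and_loc_footprint.py | get_real_footprint_length
-- ===== SOURCE A (Python) =====
-- def get_real_footprint_length (m_vec, m_vec_start, m_vec_stop, complete_vec):
--     """
--     extract complete footprint length from the selected methylation vector
--     exmaple:
--     complete vec: . . . . F F F F . . . F F F . . . . . F F F F F
--     index       : 0 1 2 3 4 5 6 7 8 9 1011121314151617181920212223
--     flank vec:  :             F F . . . F F F . . . . . F
--                               6 7 8 9 10111213141516171819
--     output: [4, 3, 5]
--     """
--     # first get all footprint lengths in m_vec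
--     flen_lengths = [len(a) for a in m_vec.split(".")]
--     if m_vec.startswith("F"):
--         flen_lengths[0] = flen_lengths[0] +  len(complete_vec[0:m_vec_start].split(".")[-1])
--     if m_vec.endswith("F"):
--         flen_lengths[-1] = flen_lengths[-1] +  len(complete_vec[m_vec_stop:].split(".")[0])
--     # exclude all zeros
--     return_list = [a for a in flen_lengths if a!=0]
--     # prepare a footprint length vector - at each index it will tell what is the footprint size that index it associated with
--     first_f = False
--     cnt = 0
--     loc_first = []
--     gap = True
--     for c in m_vec:
--         if c == 'F':
--             first_f = True
--             if gap == True: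
--                 loc_first.append (cnt)
--                 gap = False
--         else:
--             first_f = False
--             gap = True
--         cnt +=1
--     out_vec = [0]*len(m_vec)
--     for i in range (len(loc_first)):
--         for j in range(loc_first[i], len(m_vec)):
--             if m_vec[j] == "F":
--                 out_vec[j] = return_list[i]
--             else:
--                 break
--     return return_list, out_vec, loc_first
-- ===== SOURCE B (Python) =====
-- def _trailing_nondot_len(s):
--     # length of the run of non-'.' characters at the end of s
--     n = 0
--     for ch in reversed(s):
--         if ch == '.':
--             break
--         n += 1
--     return n
--
--
-- def _leading_nondot_len(s):
--     # length of the run of non-'.' characters at the start of s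
--     n = 0
--     for ch in s:
--         if ch == '.':
--             break
--         n += 1
--     return n
--
--
-- def get_real_footprint_length(m_vec, m_vec_start, m_vec_stop, complete_vec):
--     # one pass: collect maximal non-'.' segment lengths and maximal 'F'-run
--     # extents (start, length), flushing each as it closes
--     segs = []
--     runs = []
--     seg_len = 0
--     run_start = 0
--     run_len = 0
--     for i, c in enumerate(m_vec):
--         if c == '.':
--             if seg_len:
--                 segs.append(seg_len)
--                 seg_len = 0
--             if run_len:
--                 runs.append((run_start, run_len))
--                 run_len = 0
--         else:
--             seg_len += 1
--             if c == 'F':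
--                 if run_len == 0:
--                     run_start = i
--                 run_len += 1
--             elif run_len:
--                 runs.append((run_start, run_len))
--                 run_len = 0
--     if seg_len:
--         segs.append(seg_len)
--     if run_len:
--         runs.append((run_start, run_len))
--     # flank adjustments at the borders of the window
--     if m_vec.startswith('F'):
--         segs[0] += _trailing_nondot_len(complete_vec[0:m_vec_start])
--     if m_vec.endswith('F'):
--         segs[-1] += _leading_nondot_len(complete_vec[m_vec_stop:])
--     # paint each run's segment length across its extent
--     out_vec = [0] * len(m_vec)
--     for idx, (s, l) in enumerate(runs):
--         v = segs[idx]
--         out_vec[s:s + l] = [v] * l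
--     return segs, out_vec, [s for s, _ in runs]
-- ===== Notes on version B (the rewrite author's own statement) =====
-- stated objective: alternative
-- what changed: replaces A's split-then-filter length pass, separate gap-flag scan for run starts and nested re-reading fill loop by a single enumerate pass that flushes maximal non-'.' segment lengths and (start,length) F-run extents as they close, counts the flank runs directly instead of splitting, and paints out_vec by slice assignment from the recorded run extents
import Mathlib
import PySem

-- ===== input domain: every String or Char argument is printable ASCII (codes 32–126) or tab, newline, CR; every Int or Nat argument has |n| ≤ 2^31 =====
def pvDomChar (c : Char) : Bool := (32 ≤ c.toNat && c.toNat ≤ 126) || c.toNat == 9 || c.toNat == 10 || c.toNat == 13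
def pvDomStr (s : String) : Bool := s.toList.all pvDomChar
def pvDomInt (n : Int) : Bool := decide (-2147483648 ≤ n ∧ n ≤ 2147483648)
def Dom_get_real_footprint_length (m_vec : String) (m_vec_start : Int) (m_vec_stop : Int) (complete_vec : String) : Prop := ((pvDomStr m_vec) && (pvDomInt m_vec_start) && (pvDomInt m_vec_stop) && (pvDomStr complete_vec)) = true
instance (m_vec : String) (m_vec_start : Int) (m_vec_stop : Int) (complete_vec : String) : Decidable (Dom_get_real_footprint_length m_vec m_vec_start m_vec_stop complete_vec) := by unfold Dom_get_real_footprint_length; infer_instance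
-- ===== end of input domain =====

-- B replaces A's split-then-filter lengths, separate gap-flag scan and nested re-reading fill loop by one
-- enumerate pass flushing maximal non-'.' segment lengths and (start,length) F-run extents as they close,
-- direct flank run counters and slice-assignment painting; equal to A wherever A returns (Pre_ excludes
-- exactly the inputs on which both raise IndexError).


-- ===== PORT A =====
-- inner fill loop: 'for j in range(loc_first[i], len(m_vec)): if m_vec[j] == "F": out_vec[j] = return_list[i] else: break'
def pvFillA (mv : List Char) (v : Int) (j : Int) (out : List Int) : List Int :=
  if _h : j < (mv.length : Int) then
    if PySem.List.pyGet? mv j = some 'F' then pvFillA mv v (j + 1) (PySem.List.pySetD out j v)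
    else out
  else out
termination_by ((mv.length : Int) - j).toNat
decreasing_by omega

def get_real_footprint_length (m_vec : String) (m_vec_start : Int) (m_vec_stop : Int) (complete_vec : String) : List Int × List Int × List Int :=
  let mv := m_vec.toList
  let cv := complete_vec.toList
  -- flen_lengths = [len(a) for a in m_vec.split(".")]
  let flen_lengths : List Int := (PySem.Chars.splitOn mv ['.']).map (fun a => (a.length : Int))
  -- if m_vec.startswith("F"): flen_lengths[0] = flen_lengths[0] + len(complete_vec[0:m_vec_start].split(".")[-1])
  -- (the list from split is never empty, so [0] / [-1] cannot raise: pyGetD is exact here)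
  let flen_lengths :=
    if PySem.Chars.startswith mv ['F'] then
      flen_lengths.set 0 (PySem.List.pyGetD flen_lengths 0 0 +
        ((PySem.List.pyGetD (PySem.Chars.splitOn (PySem.List.slice cv (some 0) (some m_vec_start)) ['.']) (-1) []).length : Int))
    else flen_lengths
  -- if m_vec.endswith("F"): flen_lengths[-1] = flen_lengths[-1] + len(complete_vec[m_vec_stop:].split(".")[0])
  let flen_lengths :=
    if PySem.Chars.endswith mv ['F'] then
      flen_lengths.set (flen_lengths.length - 1) (PySem.List.pyGetD flen_lengths (-1) 0 +
        ((PySem.List.pyGetD (PySem.Chars.splitOn (PySem.List.slice cv (some m_vec_stop) none) ['.']) 0 []).length : Int))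
    else flen_lengths
  -- return_list = [a for a in flen_lengths if a != 0]
  let return_list := flen_lengths.filter (fun a => a != 0)
  -- the first_f/cnt/loc_first/gap scan
  let st := mv.foldl (fun (st : Bool × Int × List Int × Bool) c =>
      let cnt := st.2.1; let loc := st.2.2.1; let gap := st.2.2.2
      if c = 'F' then
        (true, cnt + 1, (if gap then loc ++ [cnt] else loc), (if gap then false else gap))
      else (false, cnt + 1, loc, true))
    ((false, 0, ([] : List Int), true) : Bool × Int × List Int × Bool)
  let loc_first := st.2.2.1
  -- out_vec = [0]*len(m_vec); nested fill loop (return_list[i] raises IndexError outside Pre_: pyGetD is exact under Pre_)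
  let out_vec := (PySem.List.pyRange 0 (PySem.List.len loc_first) 1).foldl (fun out i =>
      pvFillA mv (PySem.List.pyGetD return_list i 0) (PySem.List.pyGetD loc_first i 0) out)
    (List.replicate mv.length (0 : Int))
  (return_list, out_vec, loc_first)

-- ===== PORT B =====
-- _leading_nondot_len: 'for ch in s: if ch == ".": break; n += 1'
def pvLeadingNondot : List Char → Int
  | [] => 0
  | c :: r => if c = '.' then 0 else pvLeadingNondot r + 1

-- _trailing_nondot_len: the same count over reversed(s)
def pvTrailingNondot (s : List Char) : Int := pvLeadingNondot s.reverse

-- 'segs[-1] += ...': modify the last element in place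
def pvModifyLast {α : Type} (f : α → α) : List α → List α
  | [] => []
  | [x] => [f x]
  | x :: y :: r => x :: pvModifyLast f (y :: r)

-- the single enumerate pass of B: state (segs, runs, seg_len, run_start, run_len)
def pvScanB (st : List Int × List (Int × Int) × Int × Int × Int) (p : Int × Char) :
    List Int × List (Int × Int) × Int × Int × Int :=
  let segs := st.1; let runs := st.2.1
  let segLen := st.2.2.1; let runStart := st.2.2.2.1; let runLen := st.2.2.2.2
  let i := p.1; let c := p.2
  if c = '.' then
    ((if segLen ≠ 0 then segs ++ [segLen] else segs),
     (if runLen ≠ 0 then runs ++ [(runStart, runLen)] else runs), 0, runStart, 0)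
  else
    if c = 'F' then
      (segs, runs, segLen + 1, (if runLen = 0 then i else runStart), runLen + 1)
    else
      (segs, (if runLen ≠ 0 then runs ++ [(runStart, runLen)] else runs), segLen + 1, runStart, 0)

def get_real_footprint_length_alt (m_vec : String) (m_vec_start : Int) (m_vec_stop : Int) (complete_vec : String) : List Int × List Int × List Int :=
  let mv := m_vec.toList
  let cv := complete_vec.toList
  let st := (PySem.List.enumerate mv 0).foldl pvScanB (([], [], 0, 0, 0) : List Int × List (Int × Int) × Int × Int × Int)
  -- final flush of the open segment / run
  let segs := if st.2.2.1 ≠ 0 then st.1 ++ [st.2.2.1] else st.1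
  let runs := if st.2.2.2.2 ≠ 0 then st.2.1 ++ [(st.2.2.2.1, st.2.2.2.2)] else st.2.1
  -- flank adjustments: segs[0] += _trailing_nondot_len(...), segs[-1] += _leading_nondot_len(...)
  let segs := if PySem.Chars.startswith mv ['F'] then
      segs.modifyHead (· + pvTrailingNondot (PySem.List.slice cv (some 0) (some m_vec_start)))
    else segs
  let segs := if PySem.Chars.endswith mv ['F'] then
      pvModifyLast (· + pvLeadingNondot (PySem.List.slice cv (some m_vec_stop) none)) segs
    else segs
  -- out_vec = [0]*len(m_vec); for idx, (s, l) in enumerate(runs): v = segs[idx]; out_vec[s:s+l] = [v]*l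
  -- (segs[idx] raises IndexError outside Pre_: pyGetD is exact under Pre_)
  let out_vec := (PySem.List.enumerate runs 0).foldl (fun out q =>
      let v := PySem.List.pyGetD segs q.1 0
      PySem.List.slice out none (some q.2.1) ++ List.replicate q.2.2.toNat v ++
        PySem.List.slice out (some (q.2.1 + q.2.2)) none)
    (List.replicate mv.length (0 : Int))
  (segs, out_vec, runs.map (·.1))

-- ===== PRECONDITION & SPEC =====
-- number of maximal blocks of characters satisfying p ('prev' = previous character satisfied p)
def pvStarts (p : Char → Bool) : Bool → List Char → Nat
  | _, [] => 0
  | prev, c :: r => (if p c && !prev then 1 else 0) + pvStarts p (p c) r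

-- Pre_ excludes exactly the inputs on which A raises IndexError (return_list[i] out of range):
-- when m_vec has more maximal 'F'-runs than maximal non-'.' blocks (B raises there too).
def Pre_get_real_footprint_length (m_vec : String) (m_vec_start : Int) (m_vec_stop : Int) (complete_vec : String) : Prop :=
  pvStarts (fun c => c == 'F') false m_vec.toList ≤ pvStarts (fun c => c != '.') false m_vec.toList
instance (m_vec : String) (m_vec_start : Int) (m_vec_stop : Int) (complete_vec : String) : Decidable (Pre_get_real_footprint_length m_vec m_vec_start m_vec_stop complete_vec) := by unfold Pre_get_real_footprint_length; infer_instance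

def pvWitness_get_real_footprint_length : String × Int × Int × String := ("F.FF", 1, 3, "FF.FFF")

def Spec_get_real_footprint_length (m_vec : String) (m_vec_start : Int) (m_vec_stop : Int) (complete_vec : String) (out : List Int × List Int × List Int) : Prop := out = get_real_footprint_length_alt m_vec m_vec_start m_vec_stop complete_vec
instance (m_vec : String) (m_vec_start : Int) (m_vec_stop : Int) (complete_vec : String) (out : List Int × List Int × List Int) : Decidable (Spec_get_real_footprint_length m_vec m_vec_start m_vec_stop complete_vec out) := by unfold Spec_get_real_footprint_length; infer_instance

-- ===== CLAIM (what is proved, stated in full; the proofs are below) =====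
def Claim_equal_get_real_footprint_length : Prop := ∀ (m_vec : String) (m_vec_start : Int) (m_vec_stop : Int) (complete_vec : String), Dom_get_real_footprint_length m_vec m_vec_start m_vec_stop complete_vec → Pre_get_real_footprint_length m_vec m_vec_start m_vec_stop complete_vec → Spec_get_real_footprint_length m_vec m_vec_start m_vec_stop complete_vec (get_real_footprint_length m_vec m_vec_start m_vec_stop complete_vec)

-- ===== LEMMAS AND PROOFS =====

-- reference: split on '.' (structural form of m_vec.split("."))
def splitD : List Char → List (List Char)
  | [] => [[]]
  | c :: r => if c = '.' then [] :: splitD r else (c :: (splitD r).headD []) :: (splitD r).tail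

-- reference: segment lengths with a pending open segment of length q (B's seg side, flush included)
def segQ (q : Int) : List Char → List Int
  | [] => if q ≠ 0 then [q] else []
  | c :: r => if c = '.' then (if q ≠ 0 then [q] else []) ++ segQ 0 r else segQ (q + 1) r

-- reference: F-runs with a pending open run (start s, length p), next index i (B's run side, flush included)
def runQ (s : Int) (p : Int) (i : Int) : List Char → List (Int × Int)
  | [] => if p ≠ 0 then [(s, p)] else []
  | c :: r =>
    if c = 'F' then runQ (if p = 0 then i else s) (p + 1) (i + 1) r
    else (if p ≠ 0 then [(s, p)] else []) ++ runQ s 0 (i + 1) r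

-- reference: the loc_first list produced by A's scan
def locQ : Bool → Int → List Char → List Int
  | _, _, [] => []
  | gap, i, c :: r =>
    if c = 'F' then (if gap then i :: locQ false (i + 1) r else locQ false (i + 1) r)
    else locQ true (i + 1) r

theorem splitD_ne_nil (cs : List Char) : splitD cs ≠ [] := by
  cases cs with
  | nil => simp [splitD]
  | cons c r => simp only [splitD]; split <;> simp

theorem splitOn_go_eq (fuel : Nat) : ∀ (l cur : List Char) (acc : List (List Char)),
    l.length < fuel →
    PySem.Chars.splitOn.go ['.'] fuel l cur acc =
      acc.reverse ++ (cur.reverse ++ (splitD l).headD []) :: (splitD l).tail := by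
  induction fuel with
  | zero => intro l cur acc h; omega
  | succ f ih =>
    intro l cur acc h
    cases l with
    | nil => simp [PySem.Chars.splitOn.go, splitD]
    | cons c rest =>
      simp only [PySem.Chars.splitOn.go, List.isPrefixOf, List.isPrefixOf_nil_left, Bool.and_true]
      by_cases hc : c = '.'
      · subst hc
        simp only [beq_self_eq_true, if_pos, List.length_cons, List.length_nil,
          Nat.zero_add, List.drop_succ_cons, List.drop_zero] at *
        rw [ih rest [] (cur.reverse :: acc) (by omega)]
        rcases hr : splitD rest with _ | ⟨hh, tt⟩
        · exact absurd hr (splitD_ne_nil rest)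
        · conv_rhs => rw [splitD]
          simp [hr]
      · have : ('.' == c) = false := beq_eq_false_iff_ne.mpr (Ne.symm hc)
        simp only [this, Bool.false_and, Bool.false_eq_true, if_false]
        rw [ih rest (c :: cur) acc (by simp at h; omega)]
        rcases hr : splitD rest with _ | ⟨hh, tt⟩
        · exact absurd hr (splitD_ne_nil rest)
        · rw [splitD, if_neg hc, hr]; simp

theorem splitOn_eq_splitD (cs : List Char) : PySem.Chars.splitOn cs ['.'] = splitD cs := by
  rw [PySem.Chars.splitOn, splitOn_go_eq (cs.length + 1) cs [] [] (by omega)]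
  rcases hr : splitD cs with _ | ⟨hh, tt⟩
  · exact absurd hr (splitD_ne_nil cs)
  · simp

theorem headD_splitD (cs : List Char) : (splitD cs).headD [] = cs.takeWhile (fun c => !(c == '.')) := by
  induction cs with
  | nil => simp [splitD]
  | cons c r ih =>
    simp only [splitD, List.takeWhile_cons]
    by_cases hc : c = '.'
    · simp [hc]
    · simp [hc]
      rw [← List.headD_eq_head?]; exact ih

theorem pvLeadingNondot_eq (cs : List Char) :
    pvLeadingNondot cs = ((cs.takeWhile (fun c => !(c == '.'))).length : Int) := by
  induction cs with
  | nil => simp [pvLeadingNondot]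
  | cons c r ih =>
    simp only [pvLeadingNondot, List.takeWhile_cons]
    by_cases hc : c = '.'
    · simp [hc]
    · simp [hc, ih]

theorem splitD_append_dot (xs : List Char) : splitD (xs ++ ['.']) = splitD xs ++ [[]] := by
  induction xs with
  | nil => simp [splitD]
  | cons c r ih =>
    simp only [List.cons_append, splitD, ih]
    rcases hr : splitD r with _ | ⟨h, t⟩
    · exact absurd hr (splitD_ne_nil r)
    · by_cases hc : c = '.' <;> simp [hc]

theorem splitD_append_ne (xs : List Char) (c : Char) (hc : c ≠ '.') :
    splitD (xs ++ [c]) = (splitD xs).dropLast ++ [(splitD xs).getLastD [] ++ [c]] := by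
  induction xs with
  | nil => simp [splitD, hc]
  | cons d r ih =>
    simp only [List.cons_append, splitD, ih]
    rcases hr : splitD r with _ | ⟨h, t⟩
    · exact absurd hr (splitD_ne_nil r)
    · by_cases hd : d = '.' <;> cases t <;> simp_all

theorem getLastD_splitD (cs : List Char) :
    (splitD cs).getLastD [] = (cs.reverse.takeWhile (fun c => !(c == '.'))).reverse := by
  induction cs using List.reverseRecOn with
  | nil => simp [splitD]
  | append_singleton xs c ih =>
    by_cases hc : c = '.'
    · subst hc; simp [splitD_append_dot]
    · simp [splitD_append_ne xs c hc, hc]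
      rw [← List.getLastD_eq_getLast?]; exact ih

theorem segQ_split (cs : List Char) : ∀ q : Int, 0 ≤ q →
    segQ q cs = ((q + (((splitD cs).headD []).length : Int)) ::
      (splitD cs).tail.map (fun a => (a.length : Int))).filter (fun a => a != 0) := by
  induction cs with
  | nil =>
    intro q hq
    rw [segQ, splitD]
    by_cases h0 : q = 0 <;> simp [h0]
  | cons c r ih =>
    intro q hq
    by_cases hc : c = '.'
    · rcases hr : splitD r with _ | ⟨hh, tt⟩
      · exact absurd hr (splitD_ne_nil r)
      · rw [segQ, splitD, if_pos hc, if_pos hc, hr]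
        rw [ih 0 le_rfl, hr]
        simp only [List.headD_cons, List.tail_cons, List.filter_cons]
        by_cases h0 : q = 0 <;> by_cases hh0 : hh = [] <;> simp [h0, hh0]
    · rw [segQ, splitD, if_neg hc, if_neg hc]
      rw [ih (q + 1) (by omega)]
      rcases hr : splitD r with _ | ⟨hh, tt⟩
      · exact absurd hr (splitD_ne_nil r)
      · simp only [hr, List.headD_cons, List.tail_cons, List.length_cons]
        congr 2
        push_cast
        ring

-- A's scan accumulates loc ++ locQ gap cnt cs
theorem ascan_loc (cs : List Char) : ∀ (ff : Bool) (cnt : Int) (loc : List Int) (gap : Bool),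
    (cs.foldl (fun (st : Bool × Int × List Int × Bool) c =>
      let cnt := st.2.1; let loc := st.2.2.1; let gap := st.2.2.2
      if c = 'F' then
        (true, cnt + 1, (if gap then loc ++ [cnt] else loc), (if gap then false else gap))
      else (false, cnt + 1, loc, true)) (ff, cnt, loc, gap)).2.2.1 = loc ++ locQ gap cnt cs := by
  induction cs with
  | nil => intro ff cnt loc gap; simp [locQ]
  | cons c r ih =>
    intro ff cnt loc gap
    simp only [List.foldl_cons]
    by_cases hc : c = 'F'
    · subst hc
      cases gap <;> · rw [show ∀ x : Bool × Int × List Int × Bool, x.2.2.1 = x.2.2.1 from fun _ => rfl]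
                      rw [ih]
                      simp [locQ]
    · have := ih false (cnt + 1) loc true
      simp only [if_neg hc]
      rw [ih]
      simp [locQ, hc]

-- B's scan, with the post-loop flushes folded in, is segQ / runQ
theorem bscan_flush (cs : List Char) : ∀ (i : Int) (segs : List Int) (runs : List (Int × Int)) (q s p : Int),
    (let st := (PySem.List.enumerate cs i).foldl pvScanB (segs, runs, q, s, p)
     ((if st.2.2.1 ≠ 0 then st.1 ++ [st.2.2.1] else st.1) = segs ++ segQ q cs ∧
      (if st.2.2.2.2 ≠ 0 then st.2.1 ++ [(st.2.2.2.1, st.2.2.2.2)] else st.2.1) = runs ++ runQ s p i cs)) := by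
  induction cs with
  | nil =>
    intro i segs runs q s p
    simp only [PySem.List.enumerate_nil, List.foldl_nil, segQ, runQ]
    constructor
    · by_cases h0 : q = 0 <;> simp [h0]
    · by_cases h0 : p = 0 <;> simp [h0]
  | cons c r ih =>
    intro i segs runs q s p
    simp only [PySem.List.enumerate_cons, List.foldl_cons]
    by_cases hc : c = '.'
    · subst hc
      simp only [pvScanB, if_pos rfl]
      have h := ih (i + 1) (if q ≠ 0 then segs ++ [q] else segs)
        (if p ≠ 0 then runs ++ [(s, p)] else runs) 0 s 0
      simp only [ne_eq, not_true_eq_false, if_neg, ite_false] at h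
      rw [segQ, runQ, if_pos rfl, if_neg (by decide : ¬ ('.' = 'F'))]
      refine ⟨h.1.trans ?_, h.2.trans ?_⟩ <;>
        by_cases h0 : q = 0 <;> by_cases hp : p = 0 <;> simp [h0, hp]
    · by_cases hf : c = 'F'
      · subst hf
        simp only [pvScanB, if_neg (by decide : ¬ ('F' = '.')), if_pos rfl]
        have h := ih (i + 1) segs runs (q + 1) (if p = 0 then i else s) (p + 1)
        rw [segQ, if_neg (by decide : ¬ ('F' = '.')), runQ, if_pos rfl]
        exact h
      · simp only [pvScanB, if_neg hc, if_neg hf]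
        have h := ih (i + 1) segs (if p ≠ 0 then runs ++ [(s, p)] else runs) (q + 1) s 0
        rw [segQ, if_neg hc, runQ, if_neg hf]
        refine ⟨h.1, h.2.trans ?_⟩
        by_cases hp : p = 0 <;> simp [hp]

-- A records a run's start when it opens, B when it closes: same list of starts
theorem locQ_runQ (cs : List Char) : ∀ (i s p : Int), 0 ≤ p →
    ((runQ s 0 i cs).map Prod.fst = locQ true i cs ∧
     (p ≠ 0 → (runQ s p i cs).map Prod.fst = s :: locQ false i cs)) := by
  induction cs with
  | nil =>
    intro i s p hp
    refine ⟨by simp [runQ, locQ], fun h0 => ?_⟩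
    simp [runQ, locQ, h0]
  | cons c r ih =>
    intro i s p hp
    by_cases hf : c = 'F'
    · subst hf
      constructor
      · rw [runQ, if_pos rfl, locQ]
        simp only [if_pos rfl, if_pos]
        have := (ih (i + 1) i 1 (by omega)).2 (by omega)
        simpa using this
      · intro h0
        rw [runQ, if_pos rfl, if_neg h0, locQ]
        simp only [if_pos rfl, ite_false]
        have := (ih (i + 1) s (p + 1) (by omega)).2 (by omega)
        simpa using this
    · constructor
      · rw [runQ, if_neg hf, locQ, if_neg hf]
        simpa using (ih (i + 1) s 0 (by omega)).1
      · intro h0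
        rw [runQ, if_neg hf, if_pos h0, locQ, if_neg hf]
        simpa using (ih (i + 1) s 0 (by omega)).1

-- counting: number of runs/segments, linking Pre_ to the reference lists
theorem len_runQ (cs : List Char) : ∀ (i s p : Int), 0 ≤ p →
    (runQ s p i cs).length = pvStarts (fun c => c == 'F') (decide (p ≠ 0)) cs + (if p ≠ 0 then 1 else 0) := by
  induction cs with
  | nil =>
    intro i s p hp
    by_cases h0 : p = 0 <;> simp [runQ, pvStarts, h0]
  | cons c r ih =>
    intro i s p hp
    by_cases hf : c = 'F'
    · subst hf
      rw [runQ, if_pos rfl, pvStarts]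
      rw [ih (i + 1) (if p = 0 then i else s) (p + 1) (by omega)]
      have h1 : p + 1 ≠ 0 := by omega
      by_cases h0 : p = 0 <;> simp [h0, h1] <;> omega
    · rw [runQ, if_neg hf, pvStarts]
      rw [List.length_append, ih (i + 1) s 0 (by omega)]
      have hcf : (c == 'F') = false := by simp [hf]
      by_cases h0 : p = 0 <;> simp [h0, hcf] <;> omega

theorem len_segQ (cs : List Char) : ∀ q : Int, 0 ≤ q →
    (segQ q cs).length = pvStarts (fun c => c != '.') (decide (q ≠ 0)) cs + (if q ≠ 0 then 1 else 0) := by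
  induction cs with
  | nil =>
    intro q hq
    by_cases h0 : q = 0 <;> simp [segQ, pvStarts, h0]
  | cons c r ih =>
    intro q hq
    by_cases hc : c = '.'
    · subst hc
      rw [segQ, if_pos rfl, pvStarts]
      rw [List.length_append, ih 0 le_rfl]
      by_cases h0 : q = 0 <;> simp [h0] <;> omega
    · rw [segQ, if_neg hc, pvStarts]
      rw [ih (q + 1) (by omega)]
      have hcd : (c != '.') = true := by simp [hc]
      have h1 : q + 1 ≠ 0 := by omega
      by_cases h0 : q = 0 <;> simp [h0, hcd, h1] <;> omega

-- a recorded run is an 'F'-block of mv with nothing 'F' right after it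
def pvIsRun (mv : List Char) (s l : Int) : Prop :=
  0 ≤ s ∧ 0 < l ∧ s + l ≤ (mv.length : Int) ∧
  (∀ j : Nat, s.toNat ≤ j → j < (s + l).toNat → mv[j]? = some 'F') ∧ mv[(s + l).toNat]? ≠ some 'F'

theorem runQ_spec (mv : List Char) (cs : List Char) : ∀ (i s0 p : Int),
    0 ≤ i → 0 ≤ p → i.toNat ≤ mv.length → cs = mv.drop i.toNat →
    (p ≠ 0 → 0 ≤ s0 ∧ s0 + p = i ∧ ∀ j : Nat, s0.toNat ≤ j → j < i.toNat → mv[j]? = some 'F') →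
    ∀ q ∈ runQ s0 p i cs, pvIsRun mv q.1 q.2 := by
  induction cs with
  | nil =>
    intro i s0 p hi hp hile hdrop hopen q hq
    rw [runQ] at hq
    by_cases h0 : p = 0
    · simp [h0] at hq
    · simp only [h0, ne_eq, not_false_iff, if_pos, List.mem_singleton] at hq
      obtain ⟨hs0, hsum, hchars⟩ := hopen h0
      have hlen : mv.length ≤ i.toNat := List.drop_eq_nil_iff.mp hdrop.symm
      subst hq
      refine ⟨hs0, by omega, by simp; omega, ?_, ?_⟩
      · intro j hj1 hj2
        exact hchars j hj1 (by omega)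
      · rw [List.getElem?_eq_none (by omega)]
        simp
  | cons c r ih =>
    intro i s0 p hi hp hile hdrop hopen q hq
    have hlt : i.toNat < mv.length := by
      by_contra hge
      push_neg at hge
      rw [List.drop_eq_nil_of_le hge] at hdrop
      simp at hdrop
    have hc : mv[i.toNat]? = some c := by
      have h0 := List.getElem?_drop (xs := mv) (i := i.toNat) (j := 0)
      rw [← hdrop] at h0
      simpa using h0.symm
    have hr : r = mv.drop (i + 1).toNat := by
      have h1 : (i + 1).toNat = i.toNat + 1 := by omega
      rw [h1, ← List.drop_drop (j := i.toNat) (i := 1)]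
      rw [← hdrop, List.drop_one, List.tail_cons]
    rw [runQ] at hq
    by_cases hf : c = 'F'
    · rw [if_pos hf] at hq
      refine ih (i + 1) (if p = 0 then i else s0) (p + 1) (by omega) (by omega) (by omega) hr ?_ q hq
      intro _
      by_cases h0 : p = 0
      · refine ⟨by simp [h0] <;> omega, by simp [h0] <;> omega, ?_⟩
        intro j hj1 hj2
        simp only [h0, if_pos] at hj1
        have hj : j = i.toNat := by omega
        subst hj
        rw [hc, hf]
      · obtain ⟨hs0, hsum, hchars⟩ := hopen h0
        refine ⟨by simp [h0, hs0], by simp [h0] <;> omega, ?_⟩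
        intro j hj1 hj2
        simp only [h0, ite_false] at hj1
        by_cases hji : j = i.toNat
        · subst hji; rw [hc, hf]
        · exact hchars j (by simpa [h0] using hj1) (by omega)
    · rw [if_neg hf, List.mem_append] at hq
      rcases hq with hq | hq
      · by_cases h0 : p = 0
        · simp [h0] at hq
        · simp only [h0, ne_eq, not_false_iff, if_pos, List.mem_singleton] at hq
          obtain ⟨hs0, hsum, hchars⟩ := hopen h0
          subst hq
          refine ⟨hs0, by omega, by omega, ?_, ?_⟩
          · intro j hj1 hj2
            exact hchars j hj1 (by omega)
          · have : (s0 + p).toNat = i.toNat := by omega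
            rw [this, hc]
            simp [hf]
      · exact ih (i + 1) s0 0 (by omega) le_rfl (by omega) hr (by simp) q hq

-- the inner fill loop of A paints exactly the maximal run
theorem pvFillA_paint (mv : List Char) (v : Int) : ∀ (m k : Nat) (out : List Int),
    out.length = mv.length →
    (∀ j : Nat, k ≤ j → j < k + m → mv[j]? = some 'F') → mv[k + m]? ≠ some 'F' →
    pvFillA mv v (k : Int) out = out.take k ++ List.replicate m v ++ out.drop (k + m) := by
  intro m
  induction m with
  | zero =>
    intro k out hlen hch hnot
    rw [pvFillA]
    have hget : PySem.List.pyGet? mv (k : Int) = mv[k]? := by simp [pysem]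
    split
    · rw [if_neg (by rw [hget]; simpa using hnot)]
      simp [List.take_append_drop]
    · simp [List.take_append_drop]
  | succ m ihm =>
    intro k out hlen hch hnot
    have hkF : mv[k]? = some 'F' := hch k le_rfl (by omega)
    have hklt : k < mv.length := by
      by_contra hge
      rw [List.getElem?_eq_none (by omega)] at hkF
      simp at hkF
    rw [pvFillA, dif_pos (by exact_mod_cast hklt)]
    have hget : PySem.List.pyGet? mv (k : Int) = mv[k]? := by simp [pysem]
    rw [if_pos (by rw [hget, hkF])]
    have hset : PySem.List.pySetD out (k : Int) v = out.set k v :=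
      PySem.List.pySetD_natCast out k v
    rw [show ((k : Int) + 1) = ((k + 1 : Nat) : Int) by push_cast; ring, hset]
    rw [ihm (k + 1) (out.set k v) (by simpa using hlen)
      (fun j hj1 hj2 => hch j (by omega) (by omega))
      (by rw [show k + 1 + m = k + (m + 1) by omega]; exact hnot)]
    have hkout : k < out.length := by omega
    have hsplit : out.set k v = out.take k ++ v :: out.drop (k + 1) := by
      rw [List.set_eq_take_append_cons_drop, if_pos hkout]
    rw [hsplit]
    have hL : (out.take k).length = k := by simp; omega
    rw [List.take_append, List.drop_append, hL]
    rw [show k + 1 + m - k = m + 1 by omega, show k + 1 - k = 1 by omega]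
    rw [List.drop_eq_nil_of_le (by omega : (out.take k).length ≤ k + 1 + m)]
    rw [List.take_take]
    rw [show min (k + 1) k = k by omega]
    rw [List.drop_succ_cons, List.drop_drop]
    rw [show k + 1 + m = k + (m + 1) by omega]
    simp [List.replicate_succ]

-- both paint folds compute the same list (over pairs (run, value), runs valid in mv)
theorem paint_fold (mv : List Char) (l : List ((Int × Int) × Int))
    (h : ∀ q ∈ l, pvIsRun mv q.1.1 q.1.2) :
    ∀ out : List Int, out.length = mv.length →
    (l.foldl (fun out q => pvFillA mv q.2 q.1.1 out) out =
      l.foldl (fun out q =>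
        PySem.List.slice out none (some q.1.1) ++ List.replicate q.1.2.toNat q.2 ++
          PySem.List.slice out (some (q.1.1 + q.1.2)) none) out) ∧
    (l.foldl (fun out q => pvFillA mv q.2 q.1.1 out) out).length = mv.length := by
  induction l with
  | nil => intro out hlen; exact ⟨rfl, hlen⟩
  | cons q l ih =>
    intro out hlen
    obtain ⟨hs, hl, hsl, hch, hnot⟩ := h q List.mem_cons_self
    simp only [List.foldl_cons]
    have hk : q.1.1 = ((q.1.1.toNat : Nat) : Int) := by omega
    have hm : q.1.1 + q.1.2 = ((q.1.1.toNat + q.1.2.toNat : Nat) : Int) := by omega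
    have hfill : pvFillA mv q.2 q.1.1 out =
        out.take q.1.1.toNat ++ List.replicate q.1.2.toNat q.2 ++
          out.drop (q.1.1.toNat + q.1.2.toNat) := by
      rw [hk]
      refine pvFillA_paint mv q.2 q.1.2.toNat q.1.1.toNat out hlen ?_ ?_
      · intro j hj1 hj2
        exact hch j hj1 (by omega)
      · rw [show q.1.1.toNat + q.1.2.toNat = (q.1.1 + q.1.2).toNat by omega]
        exact hnot
    have hslice : (PySem.List.slice out none (some q.1.1) ++ List.replicate q.1.2.toNat q.2 ++
        PySem.List.slice out (some (q.1.1 + q.1.2)) none) =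
        out.take q.1.1.toNat ++ List.replicate q.1.2.toNat q.2 ++
          out.drop (q.1.1.toNat + q.1.2.toNat) := by
      rw [PySem.List.slice_to _ hs, PySem.List.slice_from _ (by omega)]
      rw [show (q.1.1 + q.1.2).toNat = q.1.1.toNat + q.1.2.toNat by omega]
    rw [hfill, hslice]
    have hlen' : (out.take q.1.1.toNat ++ List.replicate q.1.2.toNat q.2 ++
        out.drop (q.1.1.toNat + q.1.2.toNat)).length = mv.length := by
      simp
      omega
    exact ih (fun q hq => h q (List.mem_cons_of_mem _ hq)) _ hlen'

-- A's index fold over range(len xs) reading xs[i], ys[i] = fold over zip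
theorem foldl_pyRange_two {γ : Type} (f : γ → Int → Int → γ) (xs ys : List Int)
    (hxy : xs.length ≤ ys.length) : ∀ (k : Nat) (init : γ),
    (PySem.List.pyRange (k : Int) (xs.length : Int) 1).foldl
        (fun acc i => f acc (PySem.List.pyGetD xs i 0) (PySem.List.pyGetD ys i 0)) init =
      ((xs.drop k).zip (ys.drop k)).foldl (fun acc q => f acc q.1 q.2) init := by
  suffices h : ∀ (n k : Nat) (init : γ), xs.length - k = n →
      (PySem.List.pyRange (k : Int) (xs.length : Int) 1).foldl
        (fun acc i => f acc (PySem.List.pyGetD xs i 0) (PySem.List.pyGetD ys i 0)) init =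
      ((xs.drop k).zip (ys.drop k)).foldl (fun acc q => f acc q.1 q.2) init by
    intro k init; exact h _ k init rfl
  intro n
  induction n with
  | zero =>
    intro k init hk
    have hge : xs.length ≤ k := by omega
    rw [PySem.List.pyRange_one_eq_nil (by exact_mod_cast hge)]
    rw [List.drop_eq_nil_of_le hge]
    simp
  | succ n ih =>
    intro k init hk
    have hklt : k < xs.length := by omega
    have hkys : k < ys.length := by omega
    rw [PySem.List.pyRange_one_cons (by exact_mod_cast hklt)]
    simp only [List.foldl_cons]
    rw [PySem.List.pyGetD_natCast, PySem.List.pyGetD_natCast]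
    rw [List.getD_eq_getElem xs 0 hklt, List.getD_eq_getElem ys 0 hkys]
    rw [show (k : Int) + 1 = ((k + 1 : Nat) : Int) by push_cast; ring]
    rw [ih (k + 1) _ (by omega)]
    rw [List.drop_eq_getElem_cons hklt, List.drop_eq_getElem_cons hkys,
      List.zip_cons_cons, List.foldl_cons]

-- B's enumerate fold reading segs[idx] = fold over zip
theorem foldl_enumerate_getD {α γ : Type} (f : γ → α → Int → γ) :
    ∀ (xs : List α) (ys : List Int) (k : Nat) (init : γ), xs.length + k ≤ ys.length →
    (PySem.List.enumerate xs (k : Int)).foldl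
        (fun acc q => f acc q.2 (PySem.List.pyGetD ys q.1 0)) init =
      (xs.zip (ys.drop k)).foldl (fun acc q => f acc q.1 q.2) init := by
  intro xs
  induction xs with
  | nil => intro ys k init h; simp [PySem.List.enumerate_nil]
  | cons x r ih =>
    intro ys k init h
    rw [PySem.List.enumerate_cons]
    simp only [List.foldl_cons]
    have hk : k < ys.length := by simp at h; omega
    rw [PySem.List.pyGetD_natCast, List.getD_eq_getElem ys 0 hk]
    rw [show (k : Int) + 1 = ((k + 1 : Nat) : Int) by push_cast; ring]
    rw [ih ys (k + 1) _ (by simp at h ⊢; omega)]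
    rw [List.drop_eq_getElem_cons hk, List.zip_cons_cons, List.foldl_cons]

theorem length_pvModifyLast {α : Type} (f : α → α) (l : List α) :
    (pvModifyLast f l).length = l.length := by
  induction l with
  | nil => rfl
  | cons x r ih =>
    cases r with
    | nil => rfl
    | cons y t => simpa [pvModifyLast] using ih

theorem pvModifyLast_append_one {α : Type} (f : α → α) (xs : List α) (x : α) :
    pvModifyLast f (xs ++ [x]) = xs ++ [f x] := by
  induction xs with
  | nil => rfl
  | cons y t ih =>
    cases t with
    | nil => rfl
    | cons z u => simpa [pvModifyLast] using ih

-- filter/adjustment commutation for the flank addition at the right border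
theorem filter_set_last (l : List Int) (d : Int) (hl : l ≠ []) (hh : l.getLastD 0 ≠ 0)
    (hd : l.getLastD 0 + d ≠ 0) :
    ((l.set (l.length - 1) (PySem.List.pyGetD l (-1) 0 + d)).filter (fun a => a != 0)) =
      pvModifyLast (· + d) (l.filter (fun a => a != 0)) := by
  induction l using List.reverseRecOn with
  | nil => exact absurd rfl hl
  | append_singleton xs x ih =>
    have hx : x ≠ 0 := by simpa using hh
    have hxd : x + d ≠ 0 := by simpa using hd
    have hget : PySem.List.pyGetD (xs ++ [x]) (-1) 0 = x := by
      simp [PySem.List.pyGetD, PySem.List.pyGet?, PySem.List.pyIdx?]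
    have hset : (xs ++ [x]).set ((xs ++ [x]).length - 1) (x + d) = xs ++ [x + d] := by
      rw [List.length_append]
      simpa using List.set_append_right (l₁ := xs) (l₂ := [x]) (by omega)
    rw [hget, hset]
    rw [List.filter_append, List.filter_append]
    simp only [List.filter_cons, List.filter_nil]
    have h1 : (x + d != 0) = true := by simp [hxd]
    have h2 : (x != 0) = true := by simp [hx]
    rw [h1, h2]
    simp only [if_pos]
    rw [pvModifyLast_append_one]

theorem pyGetD_neg_one {α : Type} (l : List α) (d : α) (h : l ≠ []) :
    PySem.List.pyGetD l (-1) d = l.getLastD d := by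
  induction l using List.reverseRecOn with
  | nil => simp at h
  | append_singleton xs x _ =>
    simp [PySem.List.pyGetD, PySem.List.pyGet?, PySem.List.pyIdx?]

theorem getLastD_len_map (l : List (List Char)) (h : l ≠ []) :
    (l.map (fun a => (a.length : Int))).getLastD 0 = ((l.getLastD []).length : Int) := by
  induction l using List.reverseRecOn with
  | nil => simp at h
  | append_singleton xs x _ => simp [List.getLastD_concat]

-- named forms of the two ports' components (proof-side abbreviations; each is defeq to its port's piece)
def pvA_L (cs : List Char) : List Int := (PySem.Chars.splitOn cs ['.']).map (fun a => (a.length : Int))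

def pvDA1 (cv : List Char) (a : Int) : Int :=
  ((PySem.List.pyGetD (PySem.Chars.splitOn (PySem.List.slice cv (some 0) (some a)) ['.']) (-1) []).length : Int)

def pvDA2 (cv : List Char) (b : Int) : Int :=
  ((PySem.List.pyGetD (PySem.Chars.splitOn (PySem.List.slice cv (some b) none) ['.']) 0 []).length : Int)

def pvA_L2 (cs cv : List Char) (a b : Int) : List Int :=
  let L := pvA_L cs
  let L1 := if PySem.Chars.startswith cs ['F'] then
      L.set 0 (PySem.List.pyGetD L 0 0 + pvDA1 cv a) else L
  if PySem.Chars.endswith cs ['F'] then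
    L1.set (L1.length - 1) (PySem.List.pyGetD L1 (-1) 0 + pvDA2 cv b) else L1

def pvA_RL (cs cv : List Char) (a b : Int) : List Int := (pvA_L2 cs cv a b).filter (fun x => x != 0)

def pvA_loc (cs : List Char) : List Int :=
  (cs.foldl (fun (st : Bool × Int × List Int × Bool) c =>
      let cnt := st.2.1; let loc := st.2.2.1; let gap := st.2.2.2
      if c = 'F' then
        (true, cnt + 1, (if gap then loc ++ [cnt] else loc), (if gap then false else gap))
      else (false, cnt + 1, loc, true))
    ((false, 0, ([] : List Int), true) : Bool × Int × List Int × Bool)).2.2.1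

def pvA_out (cs cv : List Char) (a b : Int) : List Int :=
  (PySem.List.pyRange 0 (PySem.List.len (pvA_loc cs)) 1).foldl (fun out i =>
      pvFillA cs (PySem.List.pyGetD (pvA_RL cs cv a b) i 0) (PySem.List.pyGetD (pvA_loc cs) i 0) out)
    (List.replicate cs.length (0 : Int))

def pvB_st (cs : List Char) : List Int × List (Int × Int) × Int × Int × Int :=
  (PySem.List.enumerate cs 0).foldl pvScanB (([], [], 0, 0, 0) : List Int × List (Int × Int) × Int × Int × Int)

def pvB_segs0 (cs : List Char) : List Int :=
  if (pvB_st cs).2.2.1 ≠ 0 then (pvB_st cs).1 ++ [(pvB_st cs).2.2.1] else (pvB_st cs).1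

def pvB_runs (cs : List Char) : List (Int × Int) :=
  if (pvB_st cs).2.2.2.2 ≠ 0 then (pvB_st cs).2.1 ++ [((pvB_st cs).2.2.2.1, (pvB_st cs).2.2.2.2)]
  else (pvB_st cs).2.1

def pvB_segs (cs cv : List Char) (a b : Int) : List Int :=
  let s1 := if PySem.Chars.startswith cs ['F'] then
      (pvB_segs0 cs).modifyHead (· + pvTrailingNondot (PySem.List.slice cv (some 0) (some a)))
    else pvB_segs0 cs
  if PySem.Chars.endswith cs ['F'] then
    pvModifyLast (· + pvLeadingNondot (PySem.List.slice cv (some b) none)) s1 else s1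

def pvB_out (cs cv : List Char) (a b : Int) : List Int :=
  (PySem.List.enumerate (pvB_runs cs) 0).foldl (fun out q =>
      let v := PySem.List.pyGetD (pvB_segs cs cv a b) q.1 0
      PySem.List.slice out none (some q.2.1) ++ List.replicate q.2.2.toNat v ++
        PySem.List.slice out (some (q.2.1 + q.2.2)) none)
    (List.replicate cs.length (0 : Int))

theorem hB_segs0 (cs : List Char) : pvB_segs0 cs = segQ 0 cs := by
  have h := (bscan_flush cs 0 [] [] 0 0 0).1
  simpa [pvB_segs0, pvB_st] using h

theorem hB_runs (cs : List Char) : pvB_runs cs = runQ 0 0 0 cs := by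
  have h := (bscan_flush cs 0 [] [] 0 0 0).2
  simpa [pvB_runs, pvB_st] using h

theorem hA_loc (cs : List Char) : pvA_loc cs = (runQ 0 0 0 cs).map Prod.fst := by
  rw [pvA_loc, ascan_loc cs false 0 [] true]
  simp [(locQ_runQ cs 0 0 0 le_rfl).1]

theorem hA_filter (cs : List Char) : (pvA_L cs).filter (fun x => x != 0) = segQ 0 cs := by
  rw [segQ_split cs 0 le_rfl, pvA_L, splitOn_eq_splitD]
  rcases hr : splitD cs with _ | ⟨hh, tt⟩
  · exact absurd hr (splitD_ne_nil cs)
  · simp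

theorem d1_eq (cv : List Char) (a : Int) :
    pvDA1 cv a = pvTrailingNondot (PySem.List.slice cv (some 0) (some a)) := by
  rw [pvDA1, splitOn_eq_splitD,
    pyGetD_neg_one _ _ (splitD_ne_nil _), getLastD_splitD, pvTrailingNondot, pvLeadingNondot_eq]
  simp

theorem d2_eq (cv : List Char) (b : Int) :
    pvDA2 cv b = pvLeadingNondot (PySem.List.slice cv (some b) none) := by
  rw [pvDA2, splitOn_eq_splitD, pvLeadingNondot_eq]
  rcases hr : splitD (PySem.List.slice cv (some b) none) with _ | ⟨hh, tt⟩
  · exact absurd hr (splitD_ne_nil _)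
  · have := headD_splitD (PySem.List.slice cv (some b) none)
    rw [hr] at this
    simp only [List.headD_cons] at this
    simp [PySem.List.pyGetD, PySem.List.pyGet?, PySem.List.pyIdx?, this]

theorem getLastD_of_ne_nil {α : Type} (l : List α) (x y : α) (h : l ≠ []) :
    l.getLastD x = l.getLastD y := by
  induction l using List.reverseRecOn with
  | nil => exact absurd rfl h
  | append_singleton xs z _ => simp [List.getLastD_concat]

theorem getLastD_cons_ne (u : Int) (t : List Int) (h : t ≠ []) :
    (u :: t).getLastD 0 = t.getLastD 0 := by
  rw [List.getLastD_cons]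
  exact getLastD_of_ne_nil t u 0 h

theorem seg_eq (cs cv : List Char) (a b : Int) : pvA_RL cs cv a b = pvB_segs cs cv a b := by
  have hd1 : 0 ≤ pvDA1 cv a := by rw [pvDA1]; exact Int.natCast_nonneg _
  have hd2 : 0 ≤ pvDA2 cv b := by rw [pvDA2]; exact Int.natCast_nonneg _
  rcases hsp : splitD cs with _ | ⟨hd, tl⟩
  · exact absurd hsp (splitD_ne_nil cs)
  have hL : pvA_L cs = (hd.length : Int) :: tl.map (fun z => (z.length : Int)) := by
    rw [pvA_L, splitOn_eq_splitD, hsp]; simp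
  have hfil : (pvA_L cs).filter (fun x => x != 0) = segQ 0 cs := hA_filter cs
  have hlastmap : (pvA_L cs).getLastD 0 = (((splitD cs).getLastD []).length : Int) := by
    rw [pvA_L, splitOn_eq_splitD]; exact getLastD_len_map _ (splitD_ne_nil cs)
  have hlast0 : 0 ≤ (pvA_L cs).getLastD 0 := by rw [hlastmap]; exact Int.natCast_nonneg _
  simp only [pvA_RL, pvA_L2, pvB_segs, ← d1_eq, ← d2_eq, hB_segs0]
  by_cases hSW : PySem.Chars.startswith cs ['F'] = true
  · -- when m_vec starts with 'F' the first split piece is nonempty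
    have hhdne : hd ≠ [] := by
      obtain ⟨r, hr⟩ := (PySem.Chars.startswith_iff cs ['F']).mp hSW
      have hh := headD_splitD cs
      rw [hsp] at hh
      simp only [List.headD_cons] at hh
      rw [hh, ← hr]
      simp
    have hlen1 : 1 ≤ hd.length := List.length_pos_iff.mpr hhdne
    have hget0 : PySem.List.pyGetD (pvA_L cs) 0 0 = (hd.length : Int) := by
      rw [hL]; simp [pysem]
    have hne0 : ((hd.length : Int) != 0) = true := by simp; omega
    have hsegQ : segQ 0 cs = (hd.length : Int) :: (tl.map (fun z => (z.length : Int))).filter (fun x => x != 0) := by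
      rw [← hfil, hL, List.filter_cons, if_pos hne0]
    by_cases hEW : PySem.Chars.endswith cs ['F'] = true
    · simp only [hSW, hEW, if_true]
      obtain ⟨r, hr⟩ := (PySem.Chars.endswith_iff cs ['F']).mp hEW
      have hlastne : (pvA_L cs).getLastD 0 ≠ 0 := by
        rw [hlastmap]
        have : (splitD cs).getLastD [] ≠ [] := by
          rw [getLastD_splitD, ← hr]
          simp
        simpa using this
      rw [hget0, hL, List.set_cons_zero]
      have hL1last : (((hd.length : Int) + pvDA1 cv a) :: tl.map (fun z => (z.length : Int))).getLastD 0 ≠ 0 := by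
        rcases htl : tl.map (fun z => (z.length : Int)) with _ | ⟨x, t⟩
        · rw [htl]
          simp only [List.getLastD_eq_getLast?, List.getLast?_singleton, Option.getD_some]
          omega
        · rw [htl, getLastD_cons_ne _ _ (by simp)]
          rw [hL, htl, getLastD_cons_ne _ _ (by simp)] at hlastne
          exact hlastne
      have hL1last0 : 0 ≤ (((hd.length : Int) + pvDA1 cv a) :: tl.map (fun z => (z.length : Int))).getLastD 0 := by
        rcases htl : tl.map (fun z => (z.length : Int)) with _ | ⟨x, t⟩
        · rw [htl]
          simp only [List.getLastD_eq_getLast?, List.getLast?_singleton, Option.getD_some]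
          omega
        · rw [htl, getLastD_cons_ne _ _ (by simp)]
          rw [hL, htl, getLastD_cons_ne _ _ (by simp)] at hlast0
          exact hlast0
      rw [filter_set_last _ _ (by simp) hL1last (by omega)]
      rw [List.filter_cons, if_pos (by simp; omega : (((hd.length : Int) + pvDA1 cv a) != 0) = true)]
      rw [hsegQ]
      simp
    · have hEW' : PySem.Chars.endswith cs ['F'] = false := by
        revert hEW; cases PySem.Chars.endswith cs ['F'] <;> simp
      simp only [hSW, hEW', if_true, Bool.false_eq_true, if_false]
      rw [hget0, hL, List.set_cons_zero]
      rw [List.filter_cons, if_pos (by simp; omega : (((hd.length : Int) + pvDA1 cv a) != 0) = true)]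
      rw [hsegQ]
      simp [List.modifyHead]
  · have hSW' : PySem.Chars.startswith cs ['F'] = false := by
      revert hSW; cases PySem.Chars.startswith cs ['F'] <;> simp
    simp only [hSW', Bool.false_eq_true, if_false]
    by_cases hEW : PySem.Chars.endswith cs ['F'] = true
    · simp only [hEW, if_true]
      obtain ⟨r, hr⟩ := (PySem.Chars.endswith_iff cs ['F']).mp hEW
      have hlastne : (pvA_L cs).getLastD 0 ≠ 0 := by
        rw [hlastmap]
        have : (splitD cs).getLastD [] ≠ [] := by
          rw [getLastD_splitD, ← hr]
          simp
        simpa using this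
      rw [filter_set_last _ _ (by rw [hL]; simp) hlastne (by omega)]
      rw [hfil]
    · have hEW' : PySem.Chars.endswith cs ['F'] = false := by
        revert hEW; cases PySem.Chars.endswith cs ['F'] <;> simp
      simp only [hEW', Bool.false_eq_true, if_false]
      exact hfil

theorem lens_eq (cs cv : List Char) (a b : Int) :
    (pvB_segs cs cv a b).length = (segQ 0 cs).length := by
  unfold pvB_segs
  split_ifs <;> simp [List.length_modifyHead, length_pvModifyLast, hB_segs0]

theorem out_eq (cs cv : List Char) (a b : Int)
    (hpre : pvStarts (fun c => c == 'F') false cs ≤ pvStarts (fun c => c != '.') false cs) :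
    pvA_out cs cv a b = pvB_out cs cv a b := by
  have hRS : (runQ 0 0 0 cs).length ≤ (pvB_segs cs cv a b).length := by
    rw [lens_eq, len_segQ cs 0 le_rfl, len_runQ cs 0 0 0 le_rfl]
    simpa using hpre
  have hxy : (pvA_loc cs).length ≤ (pvB_segs cs cv a b).length := by
    rw [hA_loc]
    simpa using hRS
  have hvalid : ∀ q ∈ (runQ 0 0 0 cs).zip (pvB_segs cs cv a b), pvIsRun cs q.1.1 q.1.2 := by
    intro q hq
    obtain ⟨r, v⟩ := q
    have hmem := (List.of_mem_zip hq).1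
    exact runQ_spec cs cs 0 0 0 le_rfl le_rfl (by simp) (by simp) (fun h => absurd rfl h) r hmem
  have hA1 : pvA_out cs cv a b =
      ((pvA_loc cs).zip (pvB_segs cs cv a b)).foldl (fun acc q => pvFillA cs q.2 q.1 acc)
        (List.replicate cs.length (0 : Int)) := by
    rw [pvA_out, seg_eq]
    have h1 := foldl_pyRange_two (fun acc s v => pvFillA cs v s acc) (pvA_loc cs)
      (pvB_segs cs cv a b) hxy 0 (List.replicate cs.length (0 : Int))
    simpa [PySem.List.len] using h1
  have hB1 : pvB_out cs cv a b =
      ((pvB_runs cs).zip (pvB_segs cs cv a b)).foldl (fun acc q =>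
        PySem.List.slice acc none (some q.1.1) ++ List.replicate q.1.2.toNat q.2 ++
          PySem.List.slice acc (some (q.1.1 + q.1.2)) none)
        (List.replicate cs.length (0 : Int)) := by
    rw [pvB_out]
    have h1 := foldl_enumerate_getD (fun acc (r : Int × Int) v =>
        PySem.List.slice acc none (some r.1) ++ List.replicate r.2.toNat v ++
          PySem.List.slice acc (some (r.1 + r.2)) none)
      (pvB_runs cs) (pvB_segs cs cv a b) 0 (List.replicate cs.length (0 : Int))
      (by rw [hB_runs]; simpa using hRS)
    simpa using h1
  have hA2 : ((pvA_loc cs).zip (pvB_segs cs cv a b)).foldl (fun acc q => pvFillA cs q.2 q.1 acc)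
      (List.replicate cs.length (0 : Int)) =
      ((runQ 0 0 0 cs).zip (pvB_segs cs cv a b)).foldl (fun acc q => pvFillA cs q.2 q.1.1 acc)
        (List.replicate cs.length (0 : Int)) := by
    rw [hA_loc, List.zip_map_left, List.foldl_map]
    refine List.foldl_ext _ _ _ ?_
    intro acc p hp
    rcases p with ⟨⟨s, l⟩, v⟩
    rfl
  rw [hA1, hA2, hB1, hB_runs]
  exact (paint_fold cs ((runQ 0 0 0 cs).zip (pvB_segs cs cv a b)) hvalid
    (List.replicate cs.length (0 : Int)) (by simp)).1

-- ===== VERDICT (by name: the statement is the Claim_ definition above) =====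
theorem get_real_footprint_length_spec : Claim_equal_get_real_footprint_length := by
  intro m_vec m_vec_start m_vec_stop complete_vec _ hpre
  unfold Pre_get_real_footprint_length at hpre
  unfold Spec_get_real_footprint_length
  have hA : get_real_footprint_length m_vec m_vec_start m_vec_stop complete_vec =
      (pvA_RL m_vec.toList complete_vec.toList m_vec_start m_vec_stop,
       pvA_out m_vec.toList complete_vec.toList m_vec_start m_vec_stop,
       pvA_loc m_vec.toList) := rfl
  have hB : get_real_footprint_length_alt m_vec m_vec_start m_vec_stop complete_vec =
      (pvB_segs m_vec.toList complete_vec.toList m_vec_start m_vec_stop,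
       pvB_out m_vec.toList complete_vec.toList m_vec_start m_vec_stop,
       (pvB_runs m_vec.toList).map (·.1)) := rfl
  rw [hA, hB, seg_eq, out_eq _ _ _ _ hpre, hA_loc, hB_runs]
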